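-- pv_equiv track=rewrite | github.com/brinza888/graphvisual | tools.py | name_letter
-- ===== SOURCE A (Python) =====
-- import string
--
-- def name_letter(n, alp=string.ascii_uppercase):
--     alp_len = len(alp)
--     name = ""
--     while True:
--         name = alp[n % alp_len] + name
--         n //= alp_len
--         if n == 0:
--             break
--     return name
-- ===== SOURCE B (Python) =====
-- import string
--
-- def name_letter(n, alp=string.ascii_uppercase):
--     alp_len = len(alp)
--     if n < alp_len:
--         return alp[n]
--     return name_letter(n // alp_len, alp) + alp[n % alp_len]
-- ===== Notes on version B (the rewrite author's own statement) =====
-- stated objective: alternative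
-- what changed: Replaces the prepend-in-a-while-loop with a top-down recursion on n // len(alp): the base case n < len(alp) returns a single letter and each recursive step appends the least-significant letter last.
import Mathlib
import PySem

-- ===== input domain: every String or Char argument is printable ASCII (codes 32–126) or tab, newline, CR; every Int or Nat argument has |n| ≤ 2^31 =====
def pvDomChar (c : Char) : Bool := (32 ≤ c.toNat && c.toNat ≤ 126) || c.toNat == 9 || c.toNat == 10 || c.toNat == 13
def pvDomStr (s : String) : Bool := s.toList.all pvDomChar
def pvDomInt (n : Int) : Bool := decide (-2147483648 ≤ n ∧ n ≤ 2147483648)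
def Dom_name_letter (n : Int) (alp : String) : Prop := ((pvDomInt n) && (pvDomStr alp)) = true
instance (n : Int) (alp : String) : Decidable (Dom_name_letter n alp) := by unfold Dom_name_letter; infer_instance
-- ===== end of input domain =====

-- B replaces A's prepend-in-a-while-loop with a top-down recursion on n // len(alp)
-- (most-significant letter produced by the recursive call, least-significant appended last).

-- ===== PORT A =====
-- the 'while True' loop of A: prepend alp[n % L], divide n, stop when it reaches 0.
-- The extra conjuncts '0 < n' ∧ floordiv n L < n' in the dite only make the recursion total
-- (on the inputs Pre_ admits they always hold when the Python loop continues); Python's own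
-- test is just 'n ≠ 0 after division'.
def nameLoopA (alp : List Char) (L : Int) (n : Int) (acc : List Char) : List Char :=
  let acc' := match PySem.List.pyGet? alp (PySem.Int.mod n L) with
    | some c => c :: acc
    | none => acc
  let n' := PySem.Int.floordiv n L
  if h : n' ≠ 0 ∧ 0 < n' ∧ n' < n then nameLoopA alp L n' acc' else acc'
termination_by n.toNat
decreasing_by
  omega

def name_letter (n : Int) (alp : String) : String :=
  String.mk (nameLoopA alp.toList (PySem.Str.len alp) n [])

-- ===== PORT B =====
-- recursion of Source B: if n < L return alp[n]; else name_letter(n // L) + alp[n % L].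
-- The dite guard '0 ≤ d ∧ d < n' only justifies termination; under Pre_ it always holds
-- when the Python recursion recurses.
def nameRecB (alp : List Char) (L : Int) (n : Int) : List Char :=
  if n < L then
    match PySem.List.pyGet? alp n with
    | some c => [c]
    | none => []
  else
    let d := PySem.Int.floordiv n L
    if h : 0 ≤ d ∧ d < n then
      nameRecB alp L d ++ (match PySem.List.pyGet? alp (PySem.Int.mod n L) with
        | some c => [c]
        | none => [])
    else []
termination_by n.toNat
decreasing_by
  omega

def name_letter_alt (n : Int) (alp : String) : String :=
  String.mk (nameRecB alp.toList (PySem.Str.len alp) n)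

-- ===== PRECONDITION & SPEC =====
-- Pre_ excludes exactly the inputs on which A never returns: an empty alphabet raises
-- ZeroDivisionError, and negative n or a one-letter alphabet with n > 0 make the while
-- loop run forever (n //= 1 and n //= L for n < 0 never reach 0).
def Pre_name_letter (n : Int) (alp : String) : Prop :=
  0 ≤ n ∧ 1 ≤ alp.toList.length ∧ (2 ≤ alp.toList.length ∨ n = 0)
instance (n : Int) (alp : String) : Decidable (Pre_name_letter n alp) := by
  unfold Pre_name_letter; infer_instance

def pvWitness_name_letter : Int × String := (27, "ABCDEFGHIJKLMNOPQRSTUVWXYZ")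

def Spec_name_letter (n : Int) (alp : String) (out : String) : Prop := out = name_letter_alt n alp
instance (n : Int) (alp : String) (out : String) : Decidable (Spec_name_letter n alp out) := by
  unfold Spec_name_letter; infer_instance

-- ===== CLAIM =====
def Claim_equal_name_letter : Prop := ∀ (n : Int) (alp : String), Dom_name_letter n alp → Pre_name_letter n alp → Spec_name_letter n alp (name_letter n alp)

-- ===== LEMMAS AND PROOFS =====

lemma loop_eq_rec (alp : List Char) (L : Int) (hL : L = (alp.length : Int)) :
    ∀ (N : Nat) (n : Int) (acc : List Char), n.toNat ≤ N → 0 ≤ n → 1 ≤ L →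
      (2 ≤ L ∨ n = 0) → nameLoopA alp L n acc = nameRecB alp L n ++ acc := by
  intro N
  induction N with
  | zero =>
    intro n acc hN hn hL1 _
    have hn0 : n = 0 := by omega
    subst hn0
    have hlt : (0:Int) < L := by omega
    have hget : PySem.List.pyGet? alp (PySem.Int.mod 0 L) = some (alp[(0:Int).toNat]'(by omega)) := by
      have hm : PySem.Int.mod 0 L = 0 := by
        rw [PySem.Int.mod_eq_emod_of_pos hlt]; simp
      rw [hm]
      exact PySem.List.pyGet?_eq_some_getElem alp (by omega) (by omega)
    have hd : PySem.Int.floordiv 0 L = 0 := by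
      rw [PySem.Int.floordiv_eq_ediv_of_pos hlt]; simp
    unfold nameLoopA nameRecB
    simp only [hd, hget]
    rw [if_pos (by omega), dif_neg (by omega)]
    have : PySem.List.pyGet? alp (0:Int) = some (alp[(0:Int).toNat]'(by omega)) :=
      PySem.List.pyGet?_eq_some_getElem alp (by omega) (by omega)
    simp [this]
  | succ N ih =>
    intro n acc hN hn hL1 h2
    have hlt : (0:Int) < L := by omega
    by_cases hnl : n < L
    · -- base case: one iteration in A, base case in B
      have hm : PySem.Int.mod n L = n := by
        rw [PySem.Int.mod_eq_emod_of_pos hlt, Int.emod_eq_of_lt hn hnl]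
      have hd : PySem.Int.floordiv n L = 0 := by
        rw [PySem.Int.floordiv_eq_ediv_of_pos hlt]
        exact Int.ediv_eq_zero_of_lt hn hnl
      have hget : PySem.List.pyGet? alp n = some (alp[n.toNat]'(by omega)) :=
        PySem.List.pyGet?_eq_some_getElem alp hn (by omega)
      unfold nameLoopA nameRecB
      simp only [hm, hd, hget]
      rw [if_pos hnl, dif_neg (by omega)]
      simp
    · -- recursive case: 2 ≤ L (n = 0 would contradict ¬ n < L), one loop step = one call
      have hL2 : 2 ≤ L := by
        rcases h2 with h | h
        · exact h
        · omega
      have hnL : L ≤ n := by omega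
      have hd : PySem.Int.floordiv n L = n / L := PySem.Int.floordiv_eq_ediv_of_pos hlt
      have hd1 : 1 ≤ n / L := by
        rw [Int.le_ediv_iff_mul_le hlt]; omega
      have hdn : n / L < n := by
        rw [← hd, PySem.Int.floordiv_lt_iff_lt_mul hlt]
        nlinarith
      have hmlb : 0 ≤ PySem.Int.mod n L := PySem.Int.mod_nonneg n hlt
      have hmub : PySem.Int.mod n L < L := PySem.Int.mod_lt n hlt
      have hget : PySem.List.pyGet? alp (PySem.Int.mod n L)
          = some (alp[(PySem.Int.mod n L).toNat]'(by omega)) :=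
        PySem.List.pyGet?_eq_some_getElem alp hmlb (by omega)
      unfold nameLoopA nameRecB
      simp only [hd, hget]
      rw [dif_pos (by constructor <;> omega), if_neg hnl, dif_pos (by constructor <;> omega)]
      rw [ih (n / L) _ (by omega) (by omega) hL1 (Or.inl hL2)]
      simp

-- ===== VERDICT =====
theorem name_letter_spec : Claim_equal_name_letter := by
  intro n alp _ hpre
  obtain ⟨hn, h1, h2⟩ := hpre
  unfold Spec_name_letter name_letter name_letter_alt
  have hlen : PySem.Str.len alp = (alp.toList.length : Int) := by
    simp [PySem.Str.len_eq]
  rw [hlen, loop_eq_rec alp.toList _ rfl n.toNat n [] (le_refl _) hn (by omega) (by omega)]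
  simp
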